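-- pv_equiv track=rewrite | github.com/CalayahXiong/Power-Connect-4-Chess-game | connect4_with_improved_alpha_beta_purning_agent.py | count_runs
-- ===== SOURCE A (Python) =====
-- def count_runs(board, piece):
--     count = 0
--     score = 0
--
--     # Check horizontal runs
--     for row in range(len(board)):
--         run_length = 0
--         for col in range(len(board[0])):
--             if board[row][col] == piece:
--                 run_length += 1
--             else:
--                 if run_length > 1:  # Only consider runs of 2 or more
--                     score += evaluate_run(run_length)
--                     count += 1
--                 run_length = 0
--         if run_length > 1:  # Check at end of row
--             score += evaluate_run(run_length)
--             count += 1
--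
--     # Check vertical runs
--     for col in range(len(board[0])):
--         run_length = 0
--         for row in range(len(board)):
--             if board[row][col] == piece:
--                 run_length += 1
--             else:
--                 if run_length > 1:
--                     score += evaluate_run(run_length)
--                     count += 1
--                 run_length = 0
--         if run_length > 1:  # Check at end of column
--             score += evaluate_run(run_length)
--             count += 1
--
--     # Check diagonals (bottom-left to top-right)
--     for r in range(len(board)):
--         for c in range(len(board[0])):
--             run_length = 0
--             while r + run_length < len(board) and c + run_length < len(board[0]) and board[r + run_length][
--                 c + run_length] == piece:
--                 run_length += 1
--             if run_length > 1:
--                 score += evaluate_run(run_length)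
--                 count += 1
--
--     # Check diagonals (top-left to bottom-right)
--     for r in range(len(board)):
--         for c in range(len(board[0])):
--             run_length = 0
--             while r - run_length >= 0 and c + run_length < len(board[0]) and board[r - run_length][
--                 c + run_length] == piece:
--                 run_length += 1
--             if run_length > 1:
--                 score += evaluate_run(run_length)
--                 count += 1
--
--     return count, score
--
-- def evaluate_run(run_length):
--     """Assign weights based on the length of the run."""
--     if run_length == 2:
--         return 2  # Small reward for pairs
--     elif run_length == 3:
--         return 10  # Higher reward for 3 in a row
--     elif run_length == 4:
--         return 100  # Winning move
--     return 0  # Ignore single pieces or runs of length < 2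
-- ===== SOURCE B (Python) =====
-- def evaluate_run(run_length):
--     if run_length == 2:
--         return 2
--     elif run_length == 3:
--         return 10
--     elif run_length == 4:
--         return 100
--     return 0
--
-- def _runs(seq, piece):
--     """Lengths of the maximal runs of `piece` in seq (two-pointer scan)."""
--     out = []
--     i, n = 0, len(seq)
--     while i < n:
--         if seq[i] == piece:
--             j = i
--             while j < n and seq[j] == piece:
--                 j += 1
--             out.append(j - i)
--             i = j
--         else:
--             i += 1
--     return out
--
-- def count_runs(board, piece):
--     R = len(board)
--     C = len(board[0])
--     rows = [row[:C] for row in board]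
--     count = 0
--     score = 0
--
--     # Horizontal and vertical: maximal runs, weighted directly.
--     cols = [[rows[r][c] for r in range(R)] for c in range(C)]
--     for line in rows + cols:
--         for L in _runs(line, piece):
--             if L > 1:
--                 count += 1
--                 score += evaluate_run(L)
--
--     # Diagonals via rolling DP: v = forward run length at (r, c); each cell
--     # contributes once, replacing A's per-cell rescan of the diagonal.
--     # Down-right direction (r+1, c+1): sweep rows bottom-up.
--     down = [0] * (C + 1)
--     for r in range(R - 1, -1, -1):
--         down = [(1 + down[c + 1]) if rows[r][c] == piece else 0 for c in range(C)] + [0]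
--         for v in down[:C]:
--             if v > 1:
--                 count += 1
--                 score += evaluate_run(v)
--
--     # Up-right direction (r-1, c+1): sweep rows top-down.
--     up = [0] * (C + 1)
--     for r in range(R):
--         up = [(1 + up[c + 1]) if rows[r][c] == piece else 0 for c in range(C)] + [0]
--         for v in up[:C]:
--             if v > 1:
--                 count += 1
--                 score += evaluate_run(v)
--
--     return count, score
-- ===== Notes on version B (the rewrite author's own statement) =====
-- stated objective: alternative
-- what changed: A rescans every diagonal from every cell with a while loop and streams horizontal/vertical runs with a run_length counter; B computes each cell's forward diagonal run length once via a rolling dynamic-programming table (run[r][c] = 1 + run[r+1][c+1]) and scores horizontal/vertical lines by extracting their maximal runs with a two-pointer scan.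
import Mathlib
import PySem

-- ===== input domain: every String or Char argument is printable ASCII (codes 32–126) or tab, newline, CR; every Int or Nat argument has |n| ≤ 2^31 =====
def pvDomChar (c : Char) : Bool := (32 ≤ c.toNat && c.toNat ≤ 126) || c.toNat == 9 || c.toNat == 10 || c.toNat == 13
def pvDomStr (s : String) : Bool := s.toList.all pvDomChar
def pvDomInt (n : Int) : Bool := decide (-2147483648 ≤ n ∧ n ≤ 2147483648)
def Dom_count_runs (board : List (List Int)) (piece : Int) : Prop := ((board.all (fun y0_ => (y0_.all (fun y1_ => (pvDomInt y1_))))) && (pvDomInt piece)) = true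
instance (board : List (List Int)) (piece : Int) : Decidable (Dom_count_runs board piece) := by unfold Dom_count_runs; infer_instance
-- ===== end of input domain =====

-- B replaces A's per-cell rescan of each diagonal by a rolling dynamic-programming
-- table of forward diagonal run lengths, and scores horizontal/vertical maximal runs
-- directly; objective: alternative (fewer cell visits, not measurably faster on random boards).

-- ===== PORT A =====
-- shared weight table (same helper function in both Python files)
def evaluate_run (run_length : Int) : Int :=
  if run_length = 2 then 2
  else if run_length = 3 then 10
  else if run_length = 4 then 100
  else 0

-- board[r][c]; under Pre_ every access is in range, so the defaults are never observed
def pvCell (board : List (List Int)) (r c : Nat) : Int := (board.getD r []).getD c 0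

-- one step of A's streaming run detection (state = (run_length, count, score))
def pvStepH (piece : Int) (s : Int × Int × Int) (x : Int) : Int × Int × Int :=
  if x = piece then (s.1 + 1, s.2.1, s.2.2)
  else if s.1 > 1 then (0, s.2.1 + 1, s.2.2 + evaluate_run s.1) else (0, s.2.1, s.2.2)

-- A's end-of-line flush
def pvFlushH (s : Int × Int × Int) : Int × Int :=
  if s.1 > 1 then (s.2.1 + 1, s.2.2 + evaluate_run s.1) else (s.2.1, s.2.2)

-- A's down-right while loop: k is run_length
def pvWhileDown (board : List (List Int)) (piece : Int) (R C r c k : Nat) : Nat :=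
  if h : r + k < R ∧ c + k < C ∧ pvCell board (r + k) (c + k) = piece then
    pvWhileDown board piece R C r c (k + 1)
  else k
termination_by R - (r + k)
decreasing_by omega

-- A's up-right while loop (r - run_length >= 0 becomes k ≤ r)
def pvWhileUp (board : List (List Int)) (piece : Int) (C r c k : Nat) : Nat :=
  if h : k ≤ r ∧ c + k < C ∧ pvCell board (r - k) (c + k) = piece then
    pvWhileUp board piece C r c (k + 1)
  else k
termination_by r + 1 - k
decreasing_by omega

def count_runs (board : List (List Int)) (piece : Int) : Int × Int :=
  let R := board.length
  let C := (board.getD 0 []).length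
  -- horizontal runs
  let hcs := (List.range R).foldl (fun (cs : Int × Int) r =>
      pvFlushH ((List.range C).foldl (fun s c => pvStepH piece s (pvCell board r c)) (0, cs.1, cs.2))) (0, 0)
  -- vertical runs
  let vcs := (List.range C).foldl (fun (cs : Int × Int) c =>
      pvFlushH ((List.range R).foldl (fun s r => pvStepH piece s (pvCell board r c)) (0, cs.1, cs.2))) hcs
  -- diagonals (bottom-left to top-right in A's indexing: direction (+1,+1))
  let dcs := (List.range R).foldl (fun (cs : Int × Int) r =>
      (List.range C).foldl (fun (cs : Int × Int) c =>
        let L : Int := (pvWhileDown board piece R C r c 0 : Int)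
        if L > 1 then (cs.1 + 1, cs.2 + evaluate_run L) else cs) cs) vcs
  -- diagonals (top-left to bottom-right: direction (-1,+1))
  let ucs := (List.range R).foldl (fun (cs : Int × Int) r =>
      (List.range C).foldl (fun (cs : Int × Int) c =>
        let L : Int := (pvWhileUp board piece C r c 0 : Int)
        if L > 1 then (cs.1 + 1, cs.2 + evaluate_run L) else cs) cs) dcs
  ucs

-- ===== PORT B =====
-- maximal run lengths of `piece` in a line (Source B's two-pointer scan:
-- the inner `while j` scan is the takeWhile/dropWhile split)
def pvRuns (piece : Int) : List Int → List Nat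
  | [] => []
  | x :: t =>
    if x = piece then (1 + (t.takeWhile (· == piece)).length) :: pvRuns piece (t.dropWhile (· == piece))
    else pvRuns piece t
termination_by l => l.length
decreasing_by
  · have := List.length_dropWhile_le (· == piece) t; simp; omega
  · simp

-- score/count one line from its maximal runs
def pvLineUpd (piece : Int) (cs : Int × Int) (line : List Int) : Int × Int :=
  (pvRuns piece line).foldl
    (fun (cs : Int × Int) (L : Nat) => if (L : Int) > 1 then (cs.1 + 1, cs.2 + evaluate_run (L : Int)) else cs) cs

-- one row of the rolling diagonal DP: new[c] = 1 + prev[c+1] if piece else 0,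
-- then consume each cell's forward run length
def pvDiagStep (piece : Int) (C : Nat) (rows : List (List Int))
    (st : List Int × (Int × Int)) (r : Nat) : List Int × (Int × Int) :=
  let nw := (List.range C).map
      (fun c => if (rows.getD r []).getD c 0 = piece then 1 + st.1.getD (c + 1) 0 else 0) ++ [(0 : Int)]
  (nw, (nw.take C).foldl
      (fun (cs : Int × Int) v => if v > 1 then (cs.1 + 1, cs.2 + evaluate_run v) else cs) st.2)

def count_runs_alt (board : List (List Int)) (piece : Int) : Int × Int :=
  let R := board.length
  let C := (board.getD 0 []).length
  let rows := board.map (fun row => row.take C)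
  let cols := (List.range C).map (fun c => (List.range R).map (fun r => (rows.getD r []).getD c 0))
  -- horizontal and vertical: maximal runs, weighted directly
  let cs1 := (rows ++ cols).foldl (pvLineUpd piece) (0, 0)
  -- down-right diagonals: sweep rows bottom-up
  let d := (List.range R).reverse.foldl (pvDiagStep piece C rows) (List.replicate (C + 1) (0 : Int), cs1)
  -- up-right diagonals: sweep rows top-down
  let u := (List.range R).foldl (pvDiagStep piece C rows) (List.replicate (C + 1) (0 : Int), d.2)
  u.2

-- ===== PRECONDITION & SPEC =====
-- Pre_ excludes exactly the inputs where Python A raises IndexError: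
-- the empty board (board[0]) and boards whose some row is shorter than row 0.
def Pre_count_runs (board : List (List Int)) (piece : Int) : Prop :=
  board ≠ [] ∧ ∀ row ∈ board, (board.getD 0 []).length ≤ row.length
instance (board : List (List Int)) (piece : Int) : Decidable (Pre_count_runs board piece) := by
  unfold Pre_count_runs; infer_instance

def pvWitness_count_runs : List (List Int) × Int := ([[1, 1], [0, 1]], 1)

def Spec_count_runs (board : List (List Int)) (piece : Int) (out : Int × Int) : Prop :=
  out = count_runs_alt board piece
instance (board : List (List Int)) (piece : Int) (out : Int × Int) : Decidable (Spec_count_runs board piece out) := by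
  unfold Spec_count_runs; infer_instance

-- ===== CLAIM (what is proved, stated in full; the proofs are below) =====
def Claim_equal_count_runs : Prop := ∀ (board : List (List Int)) (piece : Int),
  Dom_count_runs board piece → Pre_count_runs board piece →
  Spec_count_runs board piece (count_runs board piece)



-- ===== LEMMAS AND PROOFS =====

-- forward run length from (r,c) in direction (+1,+1)
def pvLdown (board : List (List Int)) (piece : Int) (R C r c : Nat) : Nat :=
  if h : r < R ∧ c < C ∧ pvCell board r c = piece then 1 + pvLdown board piece R C (r + 1) (c + 1)
  else 0
termination_by R - r
decreasing_by omega

-- forward run length from (r,c) in direction (-1,+1)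
def pvLup (board : List (List Int)) (piece : Int) (C : Nat) : Nat → Nat → Nat
  | 0, c => if c < C ∧ pvCell board 0 c = piece then 1 else 0
  | r + 1, c => if c < C ∧ pvCell board (r + 1) c = piece then 1 + pvLup board piece C r (c + 1) else 0

theorem pvWhileDown_eq (board : List (List Int)) (piece : Int) (R C r c k : Nat) :
    pvWhileDown board piece R C r c k = k + pvLdown board piece R C (r + k) (c + k) := by
  rw [pvWhileDown]
  split
  · rename_i h
    rw [pvWhileDown_eq board piece R C r c (k + 1)]
    conv_rhs => rw [pvLdown, dif_pos h]
    have h1 : r + (k + 1) = (r + k) + 1 := by omega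
    have h2 : c + (k + 1) = (c + k) + 1 := by omega
    rw [h1, h2]; omega
  · rename_i h
    conv_rhs => rw [pvLdown, dif_neg h]
    omega
termination_by R - (r + k)
decreasing_by omega

theorem pvWhileUp_eq (board : List (List Int)) (piece : Int) (C r c k : Nat) (hk : k ≤ r) :
    pvWhileUp board piece C r c k = k + pvLup board piece C (r - k) (c + k) := by
  rw [pvWhileUp]
  split
  · rename_i h
    by_cases hkr : k = r
    · subst hkr
      rw [pvWhileUp, dif_neg (by rintro ⟨h1, -, -⟩; omega)]
      have h0 : k - k = 0 := by omega
      rw [h0, pvLup, if_pos ⟨h.2.1, by simpa [h0] using h.2.2⟩]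
    · have hk1 : k + 1 ≤ r := by omega
      rw [pvWhileUp_eq board piece C r c (k + 1) hk1]
      obtain ⟨m, hm⟩ : ∃ m, r - k = m + 1 := ⟨r - k - 1, by omega⟩
      rw [hm, pvLup, if_pos ⟨h.2.1, by rw [← hm]; exact h.2.2⟩]
      have h1 : r - (k + 1) = m := by omega
      have h2 : c + (k + 1) = (c + k) + 1 := by omega
      rw [h1, h2]; omega
  · rename_i h
    have hcond : ¬ (c + k < C ∧ pvCell board (r - k) (c + k) = piece) := by
      intro hc; exact h ⟨hk, hc.1, hc.2⟩
    cases hrk : r - k with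
    | zero => rw [hrk] at hcond; rw [pvLup, if_neg hcond]; omega
    | succ m => rw [hrk] at hcond; rw [pvLup, if_neg hcond]; omega
termination_by r + 1 - k
decreasing_by omega

-- streaming run detection = maximal-run fold (rl = pending run length)
def pvRunsPre (piece : Int) (rl : Nat) (xs : List Int) : List Nat :=
  if rl = 0 then pvRuns piece xs
  else (rl + (xs.takeWhile (· == piece)).length) :: pvRuns piece (xs.dropWhile (· == piece))

lemma pvRunsPre_pos (piece : Int) (rl : Nat) (xs : List Int) (h : rl ≠ 0) :
    pvRunsPre piece rl xs = (rl + (xs.takeWhile (· == piece)).length) :: pvRuns piece (xs.dropWhile (· == piece)) := by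
  simp [pvRunsPre, h]

lemma pvRunsPre_step_pos (piece : Int) (rl : Nat) (x : Int) (t : List Int) (hx : x = piece) :
    pvRunsPre piece rl (x :: t) = pvRunsPre piece (rl + 1) t := by
  have hb : ((fun y => y == piece) x) = true := by simp [hx]
  cases rl with
  | zero =>
    rw [pvRunsPre_pos piece 1 t (by omega)]
    simp [pvRunsPre, pvRuns, hx]
  | succ n =>
    rw [pvRunsPre_pos piece (n + 1) (x :: t) (by omega), pvRunsPre_pos piece (n + 2) t (by omega)]
    rw [List.takeWhile_cons_of_pos (p := fun y => y == piece) hb,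
      List.dropWhile_cons_of_pos (p := fun y => y == piece) hb]
    simp only [List.length_cons]
    congr 1
    omega

lemma pvRunsPre_step_neg (piece : Int) (rl : Nat) (x : Int) (t : List Int) (hx : ¬ x = piece) :
    pvRunsPre piece rl (x :: t) =
      (if rl = 0 then [] else [rl]) ++ pvRuns piece t := by
  have hb : ¬ ((fun y => y == piece) x) = true := by simp [hx]
  have ht : pvRuns piece (x :: t) = pvRuns piece t := by rw [pvRuns, if_neg hx]
  cases rl with
  | zero => simp [pvRunsPre, ht]
  | succ n =>
    rw [pvRunsPre_pos piece (n + 1) (x :: t) (by omega)]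
    rw [List.takeWhile_cons_of_neg (p := fun y => y == piece) hb,
      List.dropWhile_cons_of_neg (p := fun y => y == piece) hb, ht]
    simp

lemma pvStream_eq_runs (piece : Int) (xs : List Int) : ∀ (rl : Nat) (cnt sc : Int),
    pvFlushH (xs.foldl (pvStepH piece) ((rl : Int), cnt, sc)) =
    (pvRunsPre piece rl xs).foldl
      (fun (cs : Int × Int) (L : Nat) => if (L : Int) > 1 then (cs.1 + 1, cs.2 + evaluate_run (L : Int)) else cs) (cnt, sc) := by
  induction xs with
  | nil =>
    intro rl cnt sc
    cases rl with
    | zero => simp [pvRunsPre, pvRuns, pvFlushH]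
    | succ n =>
      rw [pvRunsPre_pos piece (n + 1) [] (by omega)]
      simp only [List.takeWhile_nil, List.dropWhile_nil, List.length_nil, Nat.add_zero,
        List.foldl_nil, List.foldl_cons, pvRuns, pvFlushH]
  | cons x t ih =>
    intro rl cnt sc
    by_cases hx : x = piece
    · rw [pvRunsPre_step_pos piece rl x t hx]
      simp only [List.foldl_cons, pvStepH, if_pos hx]
      have hcast : ((rl : Int) + 1, cnt, sc) = (((rl + 1 : Nat) : Int), cnt, sc) := by push_cast; ring_nf
      rw [hcast, ih (rl + 1) cnt sc]
    · rw [pvRunsPre_step_neg piece rl x t hx]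
      simp only [List.foldl_cons, pvStepH, if_neg hx]
      have hzero : ∀ cnt' sc' : Int,
          pvFlushH (t.foldl (pvStepH piece) ((0 : Int), cnt', sc')) =
          (pvRuns piece t).foldl
            (fun (cs : Int × Int) (L : Nat) => if (L : Int) > 1 then (cs.1 + 1, cs.2 + evaluate_run (L : Int)) else cs)
            (cnt', sc') := by
        intro cnt' sc'
        have h0 := ih 0 cnt' sc'
        simp only [Nat.cast_zero] at h0
        rw [h0, show pvRunsPre piece 0 t = pvRuns piece t by simp [pvRunsPre]]
      cases rl with
      | zero =>
        simp only [Nat.cast_zero, if_neg (show ¬ ((0 : Int) > 1) by norm_num)]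
        rw [hzero cnt sc]
        simp
      | succ n =>
        simp only [if_neg (show ¬ (n + 1 = 0) by omega), List.cons_append, List.nil_append,
          List.foldl_cons]
        by_cases hgt : (((n + 1 : Nat) : Int) > 1)
        · simp only [if_pos hgt]
          exact hzero (cnt + 1) (sc + evaluate_run ((n + 1 : Nat) : Int))
        · simp only [if_neg hgt]
          exact hzero cnt sc

lemma pvStream_zero (piece : Int) (xs : List Int) (cnt sc : Int) :
    pvFlushH (xs.foldl (pvStepH piece) ((0 : Int), cnt, sc)) =
    (pvRuns piece xs).foldl
      (fun (cs : Int × Int) (L : Nat) => if (L : Int) > 1 then (cs.1 + 1, cs.2 + evaluate_run (L : Int)) else cs) (cnt, sc) := by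
  have h := pvStream_eq_runs piece xs 0 cnt sc
  simp only [Nat.cast_zero] at h
  rw [h, show pvRunsPre piece 0 xs = pvRuns piece xs by simp [pvRunsPre]]

lemma pvGetD_map_lt {A B : Type} (l : List A) (f : A → B) (r : Nat) (h : r < l.length) (d : B) (d' : A) :
    (l.map f).getD r d = f (l.getD r d') := by
  rw [List.getD_eq_getElem?_getD, List.getD_eq_getElem?_getD, List.getElem?_map,
    List.getElem?_eq_getElem h]
  rfl

lemma pvGetD_take_lt {A : Type} (xs : List A) (n c : Nat) (h : c < n) (d : A) :
    (xs.take n).getD c d = xs.getD c d := by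
  rw [List.getD_eq_getElem?_getD, List.getD_eq_getElem?_getD]
  congr 1
  rw [List.getElem?_take_of_lt h]

lemma pvMapRange_getD {A : Type} (xs : List A) (d : A) (n : Nat) (h : n ≤ xs.length) :
    (List.range n).map (fun i => xs.getD i d) = xs.take n := by
  apply List.ext_getElem
  · simp; omega
  · intro i h1 h2
    simp only [List.getElem_map, List.getElem_range, List.getElem_take]
    simp only [List.length_map, List.length_range] at h1
    rw [List.getD_eq_getElem xs d (by omega)]

lemma pvMapRange_getD_self {A : Type} (xs : List A) (d : A) :
    (List.range xs.length).map (fun i => xs.getD i d) = xs := by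
  rw [pvMapRange_getD xs d xs.length le_rfl, List.take_length]

-- fold of independent per-element increments = pair of sums
lemma pvFoldl_pair_sum {A : Type} (l : List A) (φ ψ : A → Int) : ∀ (cs : Int × Int),
    l.foldl (fun cs i => (cs.1 + φ i, cs.2 + ψ i)) cs = (cs.1 + (l.map φ).sum, cs.2 + (l.map ψ).sum) := by
  induction l with
  | nil => intro cs; simp
  | cons a t ih =>
    intro cs
    simp only [List.foldl_cons, List.map_cons, List.sum_cons, ih]
    simp only [Prod.mk.injEq]
    constructor <;> ring

-- the per-cell update, rewritten as independent increments
lemma pvCellUpd_eq (cs : Int × Int) (v : Int) :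
    (if v > 1 then (cs.1 + 1, cs.2 + evaluate_run v) else cs) =
    (cs.1 + (if v > 1 then 1 else 0), cs.2 + (if v > 1 then evaluate_run v else 0)) := by
  split_ifs <;> simp

-- ---- horizontal phase ----

lemma pvPhaseH (board : List (List Int)) (piece : Int) (C : Nat)
    (hrows : ∀ row ∈ board, C ≤ row.length) (cs : Int × Int) :
    (List.range board.length).foldl (fun (cs : Int × Int) r =>
        pvFlushH ((List.range C).foldl
          (fun s c => pvStepH piece s (pvCell board r c)) (0, cs.1, cs.2))) cs
    = (board.map (fun row => row.take C)).foldl (pvLineUpd piece) cs := by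
  conv_rhs => rw [List.foldl_map, ← pvMapRange_getD_self board [], List.foldl_map]
  apply PySem.List.foldl_congr_mem
  intro acc r hr
  simp only [List.mem_range] at hr
  have hlen : C ≤ (board.getD r []).length := by
    apply hrows
    rw [List.getD_eq_getElem board [] hr]
    exact List.getElem_mem hr
  have hline : (List.range C).map (fun c => pvCell board r c) = (board.getD r []).take C := by
    simpa [pvCell] using pvMapRange_getD (board.getD r []) 0 C hlen
  have hfm := (List.foldl_map (f := fun c => pvCell board r c) (g := pvStepH piece)
    (l := List.range C) (init := ((0 : Int), acc.1, acc.2))).symm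
  rw [hfm, hline, pvStream_zero piece ((board.getD r []).take C) acc.1 acc.2]
  simp [pvLineUpd]

-- ---- vertical phase ----

lemma pvPhaseV (board : List (List Int)) (piece : Int) (C : Nat) (cs : Int × Int) :
    (List.range C).foldl (fun (cs : Int × Int) c =>
        pvFlushH ((List.range board.length).foldl
          (fun s r => pvStepH piece s (pvCell board r c)) (0, cs.1, cs.2))) cs
    = ((List.range C).map (fun c => (List.range board.length).map
        (fun r => ((board.map (fun row => row.take C)).getD r []).getD c 0))).foldl
        (pvLineUpd piece) cs := by
  rw [List.foldl_map]
  apply PySem.List.foldl_congr_mem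
  intro acc c hc
  simp only [List.mem_range] at hc
  have hcol : (List.range board.length).map
      (fun r => ((board.map (fun row => row.take C)).getD r []).getD c 0)
      = (List.range board.length).map (fun r => pvCell board r c) := by
    apply List.map_congr_left
    intro r hr
    simp only [List.mem_range] at hr
    rw [pvGetD_map_lt board (fun row => row.take C) r hr [] []]
    exact pvGetD_take_lt (board.getD r []) C c hc 0
  rw [hcol]
  have hfm := (List.foldl_map (f := fun r => pvCell board r c) (g := pvStepH piece)
    (l := List.range board.length) (init := ((0 : Int), acc.1, acc.2))).symm
  rw [hfm, pvStream_zero piece _ acc.1 acc.2]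
  simp [pvLineUpd]

-- ---- diagonal machinery ----

def pvPhi (v : Nat) : Int := if (v : Int) > 1 then 1 else 0
def pvPsi (v : Nat) : Int := if (v : Int) > 1 then evaluate_run (v : Int) else 0

def pvDownTab (board : List (List Int)) (piece : Int) (R C r : Nat) : List Int :=
  (List.range C).map (fun c => (pvLdown board piece R C r c : Int)) ++ [(0 : Int)]

def pvUpTab (board : List (List Int)) (piece : Int) (C r : Nat) : List Int :=
  (List.range C).map (fun c => (pvLup board piece C r c : Int)) ++ [(0 : Int)]

def pvUpTab' (board : List (List Int)) (piece : Int) (C : Nat) : Nat → List Int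
  | 0 => List.replicate (C + 1) (0 : Int)
  | n + 1 => pvUpTab board piece C n

lemma pvLdown_stop (board : List (List Int)) (piece : Int) (R C c : Nat) :
    pvLdown board piece R C R c = 0 := by
  rw [pvLdown, dif_neg (by rintro ⟨h1, -, -⟩; omega)]

lemma pvLdown_stopC (board : List (List Int)) (piece : Int) (R C r : Nat) :
    pvLdown board piece R C r C = 0 := by
  rw [pvLdown, dif_neg (by rintro ⟨-, h2, -⟩; omega)]

lemma pvLup_stopC (board : List (List Int)) (piece : Int) (C r : Nat) :
    pvLup board piece C r C = 0 := by
  cases r <;> rw [pvLup] <;> exact if_neg (by rintro ⟨h1, -⟩; omega)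

lemma pvDownTab_R (board : List (List Int)) (piece : Int) (R C : Nat) :
    pvDownTab board piece R C R = List.replicate (C + 1) (0 : Int) := by
  rw [pvDownTab]
  have hmap : (List.range C).map (fun c => (pvLdown board piece R C R c : Int)) =
      List.replicate C (0 : Int) := by
    rw [List.eq_replicate_iff]
    constructor
    · simp
    · intro b hb
      simp only [List.mem_map, List.mem_range] at hb
      obtain ⟨c, -, rfl⟩ := hb
      rw [pvLdown_stop]; rfl
  rw [hmap, ← List.replicate_succ']

-- value of a padded table at c+1
lemma pvTab_getD (f : Nat → Int) (C c : Nat) :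
    ((List.range C).map f ++ [(0 : Int)]).getD (c + 1) 0 = (if c + 1 < C then f (c + 1) else 0) := by
  rw [List.getD_eq_getElem?_getD]
  by_cases h : c + 1 < C
  · rw [List.getElem?_append_left (by simpa using h)]
    rw [List.getElem?_map]
    simp [h]
  · rw [List.getElem?_append_right (by simpa using (by omega : C ≤ c + 1))]
    rw [if_neg h]
    simp only [List.length_map, List.length_range]
    rcases (by omega : c + 1 - C = 0 ∨ 0 < c + 1 - C) with h0 | h0
    · rw [h0]; rfl
    · rw [List.getElem?_eq_none (by simp; omega)]
      rfl

-- cell access through the truncated rows = pvCell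
lemma pvRowsCell (board : List (List Int)) (C r c : Nat) (hr : r < board.length) (hc : c < C) :
    ((board.map (fun row => row.take C)).getD r []).getD c 0 = pvCell board r c := by
  rw [pvGetD_map_lt board _ r hr [] []]
  exact pvGetD_take_lt _ _ _ hc 0

lemma pvDiagStep_down (board : List (List Int)) (piece : Int) (C r : Nat)
    (hr : r < board.length) (cs : Int × Int) :
    pvDiagStep piece C (board.map (fun row => row.take C))
      (pvDownTab board piece board.length C (r + 1), cs) r =
    (pvDownTab board piece board.length C r,
      (cs.1 + ((List.range C).map (fun c => pvPhi (pvLdown board piece board.length C r c))).sum,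
       cs.2 + ((List.range C).map (fun c => pvPsi (pvLdown board piece board.length C r c))).sum)) := by
  have hnw : (List.range C).map (fun c =>
        if ((board.map (fun row => row.take C)).getD r []).getD c 0 = piece then
          1 + (pvDownTab board piece board.length C (r + 1)).getD (c + 1) 0 else 0)
      = (List.range C).map (fun c => (pvLdown board piece board.length C r c : Int)) := by
    apply List.map_congr_left
    intro c hc
    simp only [List.mem_range] at hc
    rw [pvRowsCell board C r c hr hc]
    rw [pvDownTab, pvTab_getD _ C c]
    conv_rhs => rw [pvLdown]
    by_cases hp : pvCell board r c = piece
    · rw [if_pos hp, dif_pos ⟨hr, hc, hp⟩]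
      by_cases h1 : c + 1 < C
      · rw [if_pos h1]; push_cast; ring
      · have hcc : c + 1 = C := by omega
        rw [if_neg h1, hcc, pvLdown_stopC]
        norm_num
    · rw [if_neg hp, dif_neg (by rintro ⟨-, -, h3⟩; exact hp h3)]
      rfl
  simp only [pvDiagStep, hnw]
  rw [show ((List.range C).map (fun c => (pvLdown board piece board.length C r c : Int)) ++ [(0:Int)]).take C =
      (List.range C).map (fun c => (pvLdown board piece board.length C r c : Int)) by
    rw [List.take_append_of_le_length (by simp), List.take_of_length_le (by simp)]]
  rw [PySem.List.foldl_congr_mem _ _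
      (fun (cs : Int × Int) v => (cs.1 + (if v > 1 then 1 else 0),
        cs.2 + (if v > 1 then evaluate_run v else 0))) cs
      (fun acc x _ => pvCellUpd_eq acc x)]
  rw [pvFoldl_pair_sum]
  simp only [Prod.mk.injEq]
  refine ⟨rfl, ?_, ?_⟩ <;> simp [pvPhi, pvPsi, List.map_map, Function.comp_def]

lemma pvDiagStep_up (board : List (List Int)) (piece : Int) (C n : Nat)
    (hn : n < board.length) (cs : Int × Int) :
    pvDiagStep piece C (board.map (fun row => row.take C))
      (pvUpTab' board piece C n, cs) n =
    (pvUpTab' board piece C (n + 1),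
      (cs.1 + ((List.range C).map (fun c => pvPhi (pvLup board piece C n c))).sum,
       cs.2 + ((List.range C).map (fun c => pvPsi (pvLup board piece C n c))).sum)) := by
  have hnw : (List.range C).map (fun c =>
        if ((board.map (fun row => row.take C)).getD n []).getD c 0 = piece then
          1 + (pvUpTab' board piece C n).getD (c + 1) 0 else 0)
      = (List.range C).map (fun c => (pvLup board piece C n c : Int)) := by
    apply List.map_congr_left
    intro c hc
    simp only [List.mem_range] at hc
    rw [pvRowsCell board C n c hn hc]
    cases n with
    | zero =>
      rw [show pvUpTab' board piece C 0 = List.replicate (C + 1) (0 : Int) from rfl]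
      rw [show (List.replicate (C + 1) (0 : Int)).getD (c + 1) 0 = 0 by
        rw [List.getD_eq_getElem?_getD]
        simp [List.getElem?_replicate]
        split_ifs <;> rfl]
      rw [pvLup]
      by_cases hp : pvCell board 0 c = piece
      · rw [if_pos hp, if_pos ⟨hc, hp⟩]; norm_num
      · rw [if_neg hp, if_neg (by rintro ⟨-, h2⟩; exact hp h2)]; rfl
    | succ m =>
      rw [show pvUpTab' board piece C (m + 1) = pvUpTab board piece C m from rfl]
      rw [pvUpTab, pvTab_getD _ C c]
      rw [pvLup]
      by_cases hp : pvCell board (m + 1) c = piece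
      · rw [if_pos hp]
        rw [if_pos (show c < C ∧ pvCell board (m + 1) c = piece from ⟨hc, hp⟩)]
        by_cases h1 : c + 1 < C
        · rw [if_pos h1]; push_cast; ring
        · have hcc : c + 1 = C := by omega
          rw [if_neg h1, hcc, pvLup_stopC]
          norm_num
      · rw [if_neg hp, if_neg (by rintro ⟨-, h2⟩; exact hp h2)]; rfl
  simp only [pvDiagStep, hnw]
  rw [show ((List.range C).map (fun c => (pvLup board piece C n c : Int)) ++ [(0:Int)]).take C =
      (List.range C).map (fun c => (pvLup board piece C n c : Int)) by
    rw [List.take_append_of_le_length (by simp), List.take_of_length_le (by simp)]]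
  rw [PySem.List.foldl_congr_mem _ _
      (fun (cs : Int × Int) v => (cs.1 + (if v > 1 then 1 else 0),
        cs.2 + (if v > 1 then evaluate_run v else 0))) cs
      (fun acc x _ => pvCellUpd_eq acc x)]
  rw [pvFoldl_pair_sum]
  simp only [Prod.mk.injEq]
  refine ⟨?_, ?_, ?_⟩
  · rw [show pvUpTab' board piece C (n + 1) = pvUpTab board piece C n from rfl, pvUpTab]
  · simp [pvPhi, pvPsi, List.map_map, Function.comp_def]
  · simp [pvPhi, pvPsi, List.map_map, Function.comp_def]

-- per-row sums
def pvRowPhiD (board : List (List Int)) (piece : Int) (C r : Nat) : Int :=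
  ((List.range C).map (fun c => pvPhi (pvLdown board piece board.length C r c))).sum
def pvRowPsiD (board : List (List Int)) (piece : Int) (C r : Nat) : Int :=
  ((List.range C).map (fun c => pvPsi (pvLdown board piece board.length C r c))).sum
def pvRowPhiU (board : List (List Int)) (piece : Int) (C r : Nat) : Int :=
  ((List.range C).map (fun c => pvPhi (pvLup board piece C r c))).sum
def pvRowPsiU (board : List (List Int)) (piece : Int) (C r : Nat) : Int :=
  ((List.range C).map (fun c => pvPsi (pvLup board piece C r c))).sum

lemma pvPhaseD_B (board : List (List Int)) (piece : Int) (C : Nat) :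
    ∀ (n : Nat), n ≤ board.length → ∀ (cs : Int × Int),
    (List.range n).reverse.foldl
        (pvDiagStep piece C (board.map (fun row => row.take C)))
        (pvDownTab board piece board.length C n, cs) =
    (pvDownTab board piece board.length C 0,
      (cs.1 + ((List.range n).map (pvRowPhiD board piece C)).sum,
       cs.2 + ((List.range n).map (pvRowPsiD board piece C)).sum)) := by
  intro n
  induction n with
  | zero => intro _ cs; simp
  | succ m ih =>
    intro hm cs
    rw [List.range_succ, List.reverse_append]
    simp only [List.reverse_singleton, List.singleton_append, List.foldl_cons]
    rw [pvDiagStep_down board piece C m (by omega) cs]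
    rw [ih (by omega)]
    simp only [List.map_append, List.map_cons, List.map_nil, List.sum_append, List.sum_cons,
      List.sum_nil, Prod.mk.injEq]
    refine ⟨trivial, ?_, ?_⟩ <;> simp [pvRowPhiD, pvRowPsiD] <;> try ring

lemma pvPhaseU_B (board : List (List Int)) (piece : Int) (C : Nat) :
    ∀ (n : Nat), n ≤ board.length → ∀ (cs : Int × Int),
    (List.range n).foldl
        (pvDiagStep piece C (board.map (fun row => row.take C)))
        (pvUpTab' board piece C 0, cs) =
    (pvUpTab' board piece C n,
      (cs.1 + ((List.range n).map (pvRowPhiU board piece C)).sum,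
       cs.2 + ((List.range n).map (pvRowPsiU board piece C)).sum)) := by
  intro n
  induction n with
  | zero => intro _ cs; simp
  | succ m ih =>
    intro hm cs
    rw [List.range_succ, List.foldl_append]
    rw [ih (by omega)]
    simp only [List.foldl_cons, List.foldl_nil]
    rw [pvDiagStep_up board piece C m (by omega)]
    simp only [List.map_append, List.map_cons, List.map_nil, List.sum_append, List.sum_cons,
      List.sum_nil, Prod.mk.injEq]
    refine ⟨trivial, ?_, ?_⟩ <;> simp [pvRowPhiU, pvRowPsiU] <;> try ring

-- B's diagonal phases, initial table written as Python writes it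
lemma pvPhaseD_B2 (board : List (List Int)) (piece : Int) (C : Nat) (cs : Int × Int) :
    ((List.range board.length).reverse.foldl
        (pvDiagStep piece C (board.map (fun row => row.take C)))
        (List.replicate (C + 1) (0 : Int), cs)).2 =
    (cs.1 + ((List.range board.length).map (pvRowPhiD board piece C)).sum,
     cs.2 + ((List.range board.length).map (pvRowPsiD board piece C)).sum) := by
  rw [← pvDownTab_R board piece board.length C]
  rw [pvPhaseD_B board piece C board.length le_rfl cs]

lemma pvPhaseU_B2 (board : List (List Int)) (piece : Int) (C : Nat) (cs : Int × Int) :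
    ((List.range board.length).foldl
        (pvDiagStep piece C (board.map (fun row => row.take C)))
        (List.replicate (C + 1) (0 : Int), cs)).2 =
    (cs.1 + ((List.range board.length).map (pvRowPhiU board piece C)).sum,
     cs.2 + ((List.range board.length).map (pvRowPsiU board piece C)).sum) := by
  rw [show List.replicate (C + 1) (0 : Int) = pvUpTab' board piece C 0 from rfl]
  rw [pvPhaseU_B board piece C board.length le_rfl cs]

-- A's diagonal double loops as sums
lemma pvPhaseD_A (board : List (List Int)) (piece : Int) (C : Nat) (cs : Int × Int) :
    (List.range board.length).foldl (fun (cs : Int × Int) r =>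
      (List.range C).foldl (fun (cs : Int × Int) c =>
        if (pvWhileDown board piece board.length C r c 0 : Int) > 1 then
          (cs.1 + 1, cs.2 + evaluate_run (pvWhileDown board piece board.length C r c 0 : Int))
        else cs) cs) cs =
    (cs.1 + ((List.range board.length).map (pvRowPhiD board piece C)).sum,
     cs.2 + ((List.range board.length).map (pvRowPsiD board piece C)).sum) := by
  have hbody : ∀ (acc : Int × Int), ∀ r ∈ List.range board.length,
      (List.range C).foldl (fun (cs : Int × Int) c =>
        if (pvWhileDown board piece board.length C r c 0 : Int) > 1 then
          (cs.1 + 1, cs.2 + evaluate_run (pvWhileDown board piece board.length C r c 0 : Int))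
        else cs) acc =
      (acc.1 + pvRowPhiD board piece C r, acc.2 + pvRowPsiD board piece C r) := by
    intro acc r _
    have hcell : ∀ (a : Int × Int), ∀ c ∈ List.range C,
        (if (pvWhileDown board piece board.length C r c 0 : Int) > 1 then
          (a.1 + 1, a.2 + evaluate_run (pvWhileDown board piece board.length C r c 0 : Int))
        else a) =
        (a.1 + pvPhi (pvLdown board piece board.length C r c),
         a.2 + pvPsi (pvLdown board piece board.length C r c)) := by
      intro a c _
      have hL : pvWhileDown board piece board.length C r c 0 = pvLdown board piece board.length C r c := by
        simpa using pvWhileDown_eq board piece board.length C r c 0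
      simp only [hL, pvPhi, pvPsi]
      exact pvCellUpd_eq a _
    rw [PySem.List.foldl_congr_mem _ _ _ acc hcell, pvFoldl_pair_sum]
    rfl
  rw [PySem.List.foldl_congr_mem _ _ _ cs hbody, pvFoldl_pair_sum]

lemma pvPhaseU_A (board : List (List Int)) (piece : Int) (C : Nat) (cs : Int × Int) :
    (List.range board.length).foldl (fun (cs : Int × Int) r =>
      (List.range C).foldl (fun (cs : Int × Int) c =>
        if (pvWhileUp board piece C r c 0 : Int) > 1 then
          (cs.1 + 1, cs.2 + evaluate_run (pvWhileUp board piece C r c 0 : Int))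
        else cs) cs) cs =
    (cs.1 + ((List.range board.length).map (pvRowPhiU board piece C)).sum,
     cs.2 + ((List.range board.length).map (pvRowPsiU board piece C)).sum) := by
  have hbody : ∀ (acc : Int × Int), ∀ r ∈ List.range board.length,
      (List.range C).foldl (fun (cs : Int × Int) c =>
        if (pvWhileUp board piece C r c 0 : Int) > 1 then
          (cs.1 + 1, cs.2 + evaluate_run (pvWhileUp board piece C r c 0 : Int))
        else cs) acc =
      (acc.1 + pvRowPhiU board piece C r, acc.2 + pvRowPsiU board piece C r) := by
    intro acc r _
    have hcell : ∀ (a : Int × Int), ∀ c ∈ List.range C,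
        (if (pvWhileUp board piece C r c 0 : Int) > 1 then
          (a.1 + 1, a.2 + evaluate_run (pvWhileUp board piece C r c 0 : Int))
        else a) =
        (a.1 + pvPhi (pvLup board piece C r c), a.2 + pvPsi (pvLup board piece C r c)) := by
      intro a c _
      have hL : pvWhileUp board piece C r c 0 = pvLup board piece C r c := by
        simpa using pvWhileUp_eq board piece C r c 0 (by omega)
      simp only [hL, pvPhi, pvPsi]
      exact pvCellUpd_eq a _
    rw [PySem.List.foldl_congr_mem _ _ _ acc hcell, pvFoldl_pair_sum]
    rfl
  rw [PySem.List.foldl_congr_mem _ _ _ cs hbody, pvFoldl_pair_sum]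

-- ===== VERDICT (by name: the statement is the Claim_ definition above) =====
theorem count_runs_spec : Claim_equal_count_runs := by
  intro board piece _ hpre
  obtain ⟨hne, hrows⟩ := hpre
  unfold Spec_count_runs count_runs count_runs_alt
  simp only [List.foldl_append]
  rw [pvPhaseH board piece _ hrows (0, 0)]
  rw [pvPhaseV board piece _]
  rw [pvPhaseD_A board piece _]
  rw [pvPhaseU_A board piece _]
  rw [pvPhaseD_B2 board piece _]
  rw [pvPhaseU_B2 board piece _]
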